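-- pv_equiv track=rewrite | github.com/jacobwells97/COVID19PublicationDataset | ebsco/ebscoDataReader.py | buildDailyPublishSum
-- ===== SOURCE A (Python) =====
-- def buildDailyPublishSum(dailyCount):
--     dailySum = {}
--     # For each day
--     for date in dailyCount:
--         # Sum all previous day counts
--         for prevDate in dailyCount:
--             # If this date is before or on the current date,
--             if prevDate <= date:
--                 # Initialize if necessary and add to sum
--                 if not date in dailySum:
--                     dailySum[date] = 0
--                 dailySum[date] += dailyCount[prevDate]
--
--     return dailySum
-- ===== SOURCE B (Python) =====
-- def buildDailyPublishSum(dailyCount):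
--     # one sorted pass: running prefix sum over the sorted dates
--     prefix = {}
--     total = 0
--     for date in sorted(dailyCount):
--         total += dailyCount[date]
--         prefix[date] = total
--     # emit in the original key order (A's dict insertion order)
--     return {date: prefix[date] for date in dailyCount}
-- ===== Notes on version B (the rewrite author's own statement) =====
-- stated objective: faster
-- what changed: Replaces the quadratic double scan (for each date, re-sum all counts with key <= date) by one sorted pass that builds a running prefix-sum table, then emits the table in the original key order.
import Mathlib
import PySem

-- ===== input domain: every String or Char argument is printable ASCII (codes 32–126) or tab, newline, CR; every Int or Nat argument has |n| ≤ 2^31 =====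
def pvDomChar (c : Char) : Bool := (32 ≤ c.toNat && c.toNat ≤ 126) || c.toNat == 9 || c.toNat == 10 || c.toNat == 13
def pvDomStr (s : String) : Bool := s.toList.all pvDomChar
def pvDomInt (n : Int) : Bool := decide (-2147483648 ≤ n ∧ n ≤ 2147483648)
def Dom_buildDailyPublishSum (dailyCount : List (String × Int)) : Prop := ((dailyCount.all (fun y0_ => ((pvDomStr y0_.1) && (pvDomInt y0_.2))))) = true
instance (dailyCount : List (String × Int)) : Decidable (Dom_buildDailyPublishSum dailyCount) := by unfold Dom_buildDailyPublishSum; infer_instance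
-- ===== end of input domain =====

-- B replaces A's quadratic re-summing per date by one sorted prefix-sum pass (asymptotically faster).

-- ===== PORT A =====
def buildDailyPublishSum (dailyCount : List (String × Int)) : List (String × Int) :=
  let d := PySem.Dict.ofList dailyCount
  let dailySum :=
    d.keys.foldl (fun s date =>
      d.keys.foldl (fun s prevDate =>
        if prevDate ≤ date then
          let s1 := if s.contains date then s else s.insert date 0
          s1.insert date (s1.getD date 0 + d.getD prevDate 0)
        else s) s) PySem.Dict.empty
  dailySum.items

-- ===== PORT B =====
def buildDailyPublishSum_alt (dailyCount : List (String × Int)) : List (String × Int) :=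
  let d := PySem.Dict.ofList dailyCount
  let pfx :=
    ((PySem.List.sorted d.keys (fun x => x) false).foldl
      (fun (acc : PySem.Dict String Int × Int) date =>
        let total := acc.2 + d.getD date 0
        (acc.1.insert date total, total)) (PySem.Dict.empty, 0)).1
  d.keys.map (fun date => (date, pfx.getD date 0))

-- ===== PRECONDITION & SPEC =====
def Spec_buildDailyPublishSum (dailyCount : List (String × Int)) (out : List (String × Int)) : Prop := out = buildDailyPublishSum_alt dailyCount
instance (dailyCount : List (String × Int)) (out : List (String × Int)) : Decidable (Spec_buildDailyPublishSum dailyCount out) := by unfold Spec_buildDailyPublishSum; infer_instance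

-- ===== CLAIM (what is proved, stated in full; the proofs are below) =====
def Claim_equal_buildDailyPublishSum : Prop := ∀ (dailyCount : List (String × Int)), Dom_buildDailyPublishSum dailyCount → Spec_buildDailyPublishSum dailyCount (buildDailyPublishSum dailyCount)

-- ===== LEMMAS AND PROOFS =====

/-- cumulative sum of counts over the keys of `l` that are ≤ `k` -/
def Ssum (d : PySem.Dict String Int) (l : List String) (k : String) : Int :=
  ((l.filter (fun p => decide (p ≤ k))).map (fun p => d.getD p 0)).sum

theorem Ssum_cons_le (d : PySem.Dict String Int) {p k : String} (t : List String) (h : p ≤ k) :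
    Ssum d (p :: t) k = d.getD p 0 + Ssum d t k := by
  unfold Ssum
  rw [List.filter_cons, if_pos (show decide (p ≤ k) = true from decide_eq_true h),
    List.map_cons, List.sum_cons]

theorem Ssum_cons_not_le (d : PySem.Dict String Int) {p k : String} (t : List String)
    (h : ¬ p ≤ k) : Ssum d (p :: t) k = Ssum d t k := by
  unfold Ssum
  rw [List.filter_cons, if_neg (show ¬ decide (p ≤ k) = true by simpa using h)]

theorem Ssum_eq_zero (d : PySem.Dict String Int) {l : List String} {k : String}
    (h : l.filter (fun p => decide (p ≤ k)) = []) : Ssum d l k = 0 := by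
  unfold Ssum; rw [h]; rfl

theorem Ssum_perm (d : PySem.Dict String Int) {l₁ l₂ : List String} (h : l₁.Perm l₂) (k : String) :
    Ssum d l₁ k = Ssum d l₂ k := by
  unfold Ssum
  exact ((h.filter _).map _).sum_eq

theorem stepA_eq (s : PySem.Dict String Int) (date : String) (v : Int) :
    ((if s.contains date then s else s.insert date 0).insert date
      ((if s.contains date then s else s.insert date 0).getD date 0 + v))
    = s.insert date (s.getD date 0 + v) := by
  by_cases h : s.contains date = true
  · simp [h]
  · have h' : s.contains date = false := by simpa using h
    rw [PySem.Dict.getD_of_not_contains s 0 h']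
    simp [h', PySem.Dict.getD_insert_self, PySem.Dict.insert_insert_self]

theorem innerA_eq (d : PySem.Dict String Int) (date : String) :
    ∀ (l : List String) (s : PySem.Dict String Int),
      l.foldl (fun s prevDate =>
          if prevDate ≤ date then
            let s1 := if s.contains date then s else s.insert date 0
            s1.insert date (s1.getD date 0 + d.getD prevDate 0)
          else s) s
      = if l.any (fun p => decide (p ≤ date)) then
          s.insert date (s.getD date 0 + Ssum d l date)
        else s := by
  intro l
  induction l with
  | nil => intro s; simp
  | cons p t ih =>
    intro s
    by_cases hp : p ≤ date
    · have hany : ((p :: t).any (fun p => decide (p ≤ date))) = true := by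
        rw [List.any_cons, decide_eq_true hp, Bool.true_or]
      rw [if_pos hany]
      simp only [List.foldl_cons, if_pos hp]
      rw [stepA_eq, ih, Ssum_cons_le d t hp]
      by_cases ht : t.any (fun p => decide (p ≤ date)) = true
      · rw [if_pos ht]
        rw [PySem.Dict.getD_insert_self, PySem.Dict.insert_insert_self]
        ring_nf
      · rw [if_neg ht]
        have hnil : t.filter (fun p => decide (p ≤ date)) = [] := by
          rw [List.filter_eq_nil_iff]
          intro a ha
          exact (List.any_eq_false.mp (Bool.eq_false_iff.mpr ht)) a ha
        rw [Ssum_eq_zero d hnil, add_zero]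
    · have hdec : (decide (p ≤ date)) = false := by simpa using hp
      have hany : ((p :: t).any (fun p => decide (p ≤ date)))
          = (t.any (fun p => decide (p ≤ date))) := by
        rw [List.any_cons, hdec, Bool.false_or]
      simp only [List.foldl_cons, if_neg hp]
      rw [ih, hany, Ssum_cons_not_le d t hp]

theorem outer_drop (F : String → Int) :
    ∀ (l : List String) (s : PySem.Dict String Int),
      (∀ k ∈ l, s.contains k = false) → l.Nodup →
      l.foldl (fun s k => s.insert k (s.getD k 0 + F k)) s
      = l.foldl (fun s k => s.insert k (F k)) s := by
  intro l
  induction l with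
  | nil => intro s _ _; rfl
  | cons p t ih =>
    intro s hf hnd
    have hp : s.contains p = false := hf p (by simp)
    simp only [List.foldl_cons]
    rw [PySem.Dict.getD_of_not_contains s 0 hp, zero_add]
    apply ih
    · intro k hk
      rw [PySem.Dict.contains_insert]
      have hne : k ≠ p := fun h => (List.nodup_cons.mp hnd).1 (h ▸ hk)
      simp [hne, hf k (by simp [hk])]
    · exact (List.nodup_cons.mp hnd).2

theorem pfx_untouched (d : PySem.Dict String Int) :
    ∀ (t : List String) (acc : PySem.Dict String Int × Int) (k : String), k ∉ t →
      ((t.foldl (fun (acc : PySem.Dict String Int × Int) date =>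
          (acc.1.insert date (acc.2 + d.getD date 0), acc.2 + d.getD date 0)) acc).1).getD k 0
      = acc.1.getD k 0 := by
  intro t
  induction t with
  | nil => intro acc k _; rfl
  | cons p t ih =>
    intro acc k hk
    simp only [List.foldl_cons]
    rw [ih _ _ (fun h => hk (by simp [h]))]
    exact PySem.Dict.getD_insert_of_ne acc.1 _ _ (fun h => hk (by simp [h]))

theorem pfx_getD (d : PySem.Dict String Int) :
    ∀ (l : List String), l.Pairwise (· < ·) →
      ∀ (acc : PySem.Dict String Int × Int) (k : String), k ∈ l →
      ((l.foldl (fun (acc : PySem.Dict String Int × Int) date =>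
          (acc.1.insert date (acc.2 + d.getD date 0), acc.2 + d.getD date 0)) acc).1).getD k 0
      = acc.2 + Ssum d l k := by
  intro l
  induction l with
  | nil => intro _ _ k hk; cases hk
  | cons p t ih =>
    intro hpw acc k hk
    have hpt : ∀ q ∈ t, p < q := fun q hq => (List.pairwise_cons.mp hpw).1 q hq
    simp only [List.foldl_cons]
    rcases List.mem_cons.mp hk with hkp | hkt
    · subst hkp
      have hknt : k ∉ t := fun h => lt_irrefl k (hpt k h)
      rw [pfx_untouched d t _ k hknt, PySem.Dict.getD_insert_self]
      have hnil : t.filter (fun q => decide (q ≤ k)) = [] := by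
        rw [List.filter_eq_nil_iff]
        intro a ha
        simpa using not_le_of_gt (hpt a ha)
      rw [Ssum_cons_le d t (le_refl k), Ssum_eq_zero d hnil, add_zero]
    · rw [ih (List.pairwise_cons.mp hpw).2 _ k hkt]
      have hple : p ≤ k := le_of_lt (hpt k hkt)
      rw [Ssum_cons_le d t hple]
      ring_nf

-- ===== VERDICT (by name: the statement is the Claim_ definition above) =====
theorem buildDailyPublishSum_spec : Claim_equal_buildDailyPublishSum := by
  intro dailyCount _
  unfold Spec_buildDailyPublishSum
  have hA : buildDailyPublishSum dailyCount =
      ((PySem.Dict.ofList dailyCount).keys.foldl (fun s date =>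
        (PySem.Dict.ofList dailyCount).keys.foldl (fun s prevDate =>
          if prevDate ≤ date then
            let s1 := if s.contains date then s else s.insert date 0
            s1.insert date (s1.getD date 0 + (PySem.Dict.ofList dailyCount).getD prevDate 0)
          else s) s) PySem.Dict.empty).items := rfl
  have hB : buildDailyPublishSum_alt dailyCount =
      (PySem.Dict.ofList dailyCount).keys.map (fun date => (date,
        (((PySem.List.sorted (PySem.Dict.ofList dailyCount).keys (fun x => x) false).foldl
          (fun (acc : PySem.Dict String Int × Int) date =>
            (acc.1.insert date (acc.2 + (PySem.Dict.ofList dailyCount).getD date 0),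
             acc.2 + (PySem.Dict.ofList dailyCount).getD date 0)) (PySem.Dict.empty, 0)).1).getD date 0)) := rfl
  rw [hA, hB]
  set d := PySem.Dict.ofList dailyCount with hd
  have hnd : d.keys.Nodup := PySem.Dict.nodup_keys_ofList dailyCount
  have h1 : d.keys.foldl (fun s date =>
      d.keys.foldl (fun s prevDate =>
        if prevDate ≤ date then
          let s1 := if s.contains date then s else s.insert date 0
          s1.insert date (s1.getD date 0 + d.getD prevDate 0)
        else s) s) PySem.Dict.empty
      = d.keys.foldl (fun s date => s.insert date (Ssum d d.keys date)) PySem.Dict.empty := by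
    rw [PySem.List.foldl_congr_mem _ _
      (fun s date => s.insert date (s.getD date 0 + Ssum d d.keys date)) _
      (fun s date hdate => by
        rw [innerA_eq d date d.keys s]
        rw [if_pos (List.any_eq_true.mpr ⟨date, hdate, by simp⟩)])]
    exact outer_drop _ d.keys PySem.Dict.empty (fun k _ => PySem.Dict.contains_empty k) hnd
  rw [h1]
  rw [PySem.Dict.items_foldl_insert_fresh d.keys (fun a => a) (fun a => Ssum d d.keys a)
        PySem.Dict.empty (fun a _ => PySem.Dict.contains_empty a) (by simpa using hnd)]
  rw [show (PySem.Dict.empty : PySem.Dict String Int).items = [] from rfl, List.nil_append]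
  apply List.map_congr_left
  intro k hk
  have hperm := PySem.List.sorted_perm d.keys (fun x => x) false
  have hpw : (PySem.List.sorted d.keys (fun x => x) false).Pairwise (· < ·) := by
    have hle := PySem.List.sorted_pairwise d.keys (fun x => x)
    have hndl : (PySem.List.sorted d.keys (fun x => x) false).Nodup := hperm.symm.nodup hnd
    exact (hle.and hndl).imp (fun h => lt_of_le_of_ne h.1 h.2)
  have hks : k ∈ PySem.List.sorted d.keys (fun x => x) false :=
    (PySem.List.mem_sorted d.keys (fun x => x) false k).mpr hk
  rw [pfx_getD d _ hpw (PySem.Dict.empty, 0) k hks, zero_add, Ssum_perm d hperm]
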